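-- pv_equiv track=rewrite | github.com/Green-grape/codetree | 250527/1, 2, 5 더하기/1-2-5-plus.py | find_add_kind
-- ===== SOURCE A (Python) =====
-- nums = [1, 2, 5]
--
-- MOD = 10007
--
-- def find_add_kind(n):
--     dp = [-1] * (n + 1)
--     dp[0] = 0
--     for num in nums:
--         dp[num] = 1
--     for val in range(1, n + 1):
--         for num in nums:
--             if val < num or dp[val - num] == -1:
--                 continue
--             if dp[val] == -1:
--                 dp[val] = 0
--             dp[val] = (dp[val] % MOD + (dp[val - num]) % MOD) % MOD
--     return dp[n]
-- ===== SOURCE B (Python) =====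
-- MOD = 10007
--
-- # Kitamasa: f(n) = # of ordered 1/2/5-compositions of n satisfies
-- # f(v) = f(v-1) + f(v-2) + f(v-5); compute x^n mod (x^5 - x^4 - x^3 - 1) in
-- # Z/10007 by binary exponentiation, then pair the 5 coefficients with the
-- # base values f(0..4) = 1,1,2,3,5.  O(log n) instead of A's O(n).
--
-- def _mulmod(p, q):
--     p0, p1, p2, p3, p4 = p
--     q0, q1, q2, q3, q4 = q
--     r0 = p0 * q0 % MOD
--     r1 = (p0 * q1 + p1 * q0) % MOD
--     r2 = (p0 * q2 + p1 * q1 + p2 * q0) % MOD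
--     r3 = (p0 * q3 + p1 * q2 + p2 * q1 + p3 * q0) % MOD
--     r4 = (p0 * q4 + p1 * q3 + p2 * q2 + p3 * q1 + p4 * q0) % MOD
--     r5 = (p1 * q4 + p2 * q3 + p3 * q2 + p4 * q1) % MOD
--     r6 = (p2 * q4 + p3 * q3 + p4 * q2) % MOD
--     r7 = (p3 * q4 + p4 * q3) % MOD
--     r8 = p4 * q4 % MOD
--     # fold x^k -> x^(k-1) + x^(k-2) + x^(k-5) for k = 8, 7, 6, 5
--     r7 = (r7 + r8) % MOD; r6 = (r6 + r8) % MOD; r3 = (r3 + r8) % MOD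
--     r6 = (r6 + r7) % MOD; r5 = (r5 + r7) % MOD; r2 = (r2 + r7) % MOD
--     r5 = (r5 + r6) % MOD; r4 = (r4 + r6) % MOD; r1 = (r1 + r6) % MOD
--     r4 = (r4 + r5) % MOD; r3 = (r3 + r5) % MOD; r0 = (r0 + r5) % MOD
--     return (r0, r1, r2, r3, r4)
--
-- def find_add_kind(n):
--     r = (1, 0, 0, 0, 0)   # the polynomial 1
--     x = (0, 1, 0, 0, 0)   # the polynomial x
--     e = n
--     while e > 0:
--         if e % 2 == 1:
--             r = _mulmod(r, x)
--         x = _mulmod(x, x)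
--         e //= 2
--     r0, r1, r2, r3, r4 = r
--     return (r0 * 1 + r1 * 1 + r2 * 2 + r3 * 3 + r4 * 5) % MOD
-- ===== Notes on version B (the rewrite author's own statement) =====
-- stated objective: faster
-- what changed: Replaces A's O(n) dynamic-programming table over all values 1..n by Kitamasa's method: binary exponentiation of x^n modulo the characteristic polynomial x^5-x^4-x^3-1 of the order-5 recurrence, combining the 5 resulting coefficients with the five base values f(0)..f(4) of the counting sequence.
import Mathlib
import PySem

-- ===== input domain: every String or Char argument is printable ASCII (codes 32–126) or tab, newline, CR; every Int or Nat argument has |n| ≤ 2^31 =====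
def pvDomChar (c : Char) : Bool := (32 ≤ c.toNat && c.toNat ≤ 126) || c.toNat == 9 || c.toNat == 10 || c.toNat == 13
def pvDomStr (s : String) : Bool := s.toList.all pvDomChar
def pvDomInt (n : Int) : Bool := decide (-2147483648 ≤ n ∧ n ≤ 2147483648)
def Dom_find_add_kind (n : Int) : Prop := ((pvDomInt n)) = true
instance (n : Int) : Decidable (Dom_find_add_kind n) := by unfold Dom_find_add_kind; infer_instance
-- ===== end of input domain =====

-- B replaces A's O(n) dp table by Kitamasa's method: binary exponentiation of x^n modulo
-- the characteristic polynomial x^5 - x^4 - x^3 - 1 of the recurrence, O(log n) (faster).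

-- ===== PORT A =====
-- A-side helpers: Python list indexing/assignment on dp. Exact wherever the Python does not
-- raise IndexError: under Pre_find_add_kind every index the Python evaluates is 0 ≤ i < len(dp)
-- (a read at val - num < 0 only occurs in the dead right operand of an already-true 'or').
def pvAGet (a : Array Int) (i : Int) : Int :=
  if h : 0 ≤ i ∧ i.toNat < a.size then a[i.toNat] else -1
def pvASet (a : Array Int) (i : Int) (v : Int) : Array Int :=
  a.setIfInBounds i.toNat v

def find_add_kind (n : Int) : Int :=
  let dp : Array Int := Array.replicate (n + 1).toNat (-1)    -- dp = [-1] * (n + 1)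
  let dp := pvASet dp 0 0                                     -- dp[0] = 0
  let dp := [(1 : Int), 2, 5].foldl                           -- for num in nums: dp[num] = 1
    (fun d num => pvASet d num 1) dp
  let dp := (PySem.List.pyRange 1 (n + 1) 1).foldl            -- for val in range(1, n+1):
    (fun d val =>
      [(1 : Int), 2, 5].foldl                                 --   for num in nums:
        (fun d num =>
          if val < num ∨ pvAGet d (val - num) = -1 then d     -- continue
          else
            let d := if pvAGet d val = -1
                     then pvASet d val 0 else d               -- if dp[val] == -1: dp[val] = 0
            pvASet d val                                      -- dp[val] = (dp[val]%MOD + dp[val-num]%MOD)%MOD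
              (PySem.Int.mod (PySem.Int.mod (pvAGet d val) 10007
                 + PySem.Int.mod (pvAGet d (val - num)) 10007) 10007))
        d)
    dp
  pvAGet dp n                                                 -- return dp[n]

-- ===== PORT B =====
-- _mulmod: product of two degree-<5 polynomials (5-tuples, low degree first) modulo
-- x^5 - x^4 - x^3 - 1 and modulo 10007, transliterated statement by statement.
def pvMulmod (p q : Int × Int × Int × Int × Int) : Int × Int × Int × Int × Int :=
  let p0 := p.1; let p1 := p.2.1; let p2 := p.2.2.1; let p3 := p.2.2.2.1; let p4 := p.2.2.2.2
  let q0 := q.1; let q1 := q.2.1; let q2 := q.2.2.1; let q3 := q.2.2.2.1; let q4 := q.2.2.2.2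
  let r0 := PySem.Int.mod (p0 * q0) 10007
  let r1 := PySem.Int.mod (p0 * q1 + p1 * q0) 10007
  let r2 := PySem.Int.mod (p0 * q2 + p1 * q1 + p2 * q0) 10007
  let r3 := PySem.Int.mod (p0 * q3 + p1 * q2 + p2 * q1 + p3 * q0) 10007
  let r4 := PySem.Int.mod (p0 * q4 + p1 * q3 + p2 * q2 + p3 * q1 + p4 * q0) 10007
  let r5 := PySem.Int.mod (p1 * q4 + p2 * q3 + p3 * q2 + p4 * q1) 10007
  let r6 := PySem.Int.mod (p2 * q4 + p3 * q3 + p4 * q2) 10007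
  let r7 := PySem.Int.mod (p3 * q4 + p4 * q3) 10007
  let r8 := PySem.Int.mod (p4 * q4) 10007
  -- fold x^k -> x^(k-1) + x^(k-2) + x^(k-5) for k = 8, 7, 6, 5
  let r7 := PySem.Int.mod (r7 + r8) 10007
  let r6 := PySem.Int.mod (r6 + r8) 10007
  let r3 := PySem.Int.mod (r3 + r8) 10007
  let r6 := PySem.Int.mod (r6 + r7) 10007
  let r5 := PySem.Int.mod (r5 + r7) 10007
  let r2 := PySem.Int.mod (r2 + r7) 10007
  let r5 := PySem.Int.mod (r5 + r6) 10007
  let r4 := PySem.Int.mod (r4 + r6) 10007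
  let r1 := PySem.Int.mod (r1 + r6) 10007
  let r4 := PySem.Int.mod (r4 + r5) 10007
  let r3 := PySem.Int.mod (r3 + r5) 10007
  let r0 := PySem.Int.mod (r0 + r5) 10007
  (r0, r1, r2, r3, r4)

-- the 'while e > 0' loop of Source B: square-and-multiply over the quotient ring
def pvPowLoop (e : Int) (r x : Int × Int × Int × Int × Int) :
    Int × Int × Int × Int × Int :=
  if _h : 0 < e then
    pvPowLoop (PySem.Int.floordiv e 2)
      (if PySem.Int.mod e 2 = 1 then pvMulmod r x else r)
      (pvMulmod x x)
  else r
termination_by e.toNat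
decreasing_by
  rw [PySem.Int.floordiv_eq_ediv_of_pos (by norm_num)]
  omega

def find_add_kind_alt (n : Int) : Int :=
  let t := pvPowLoop n (1, 0, 0, 0, 0) (0, 1, 0, 0, 0)
  let r0 := t.1; let r1 := t.2.1; let r2 := t.2.2.1; let r3 := t.2.2.2.1; let r4 := t.2.2.2.2
  PySem.Int.mod (r0 * 1 + r1 * 1 + r2 * 2 + r3 * 3 + r4 * 5) 10007

-- ===== PRECONDITION & SPEC =====
-- Pre_ excludes exactly n < 5, where the Python A raises IndexError (dp[5] = 1 on a list of length n+1).
def Pre_find_add_kind (n : Int) : Prop := 5 ≤ n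
instance (n : Int) : Decidable (Pre_find_add_kind n) := by unfold Pre_find_add_kind; infer_instance
def pvWitness_find_add_kind : Int := 5

def Spec_find_add_kind (n : Int) (out : Int) : Prop := out = find_add_kind_alt n
instance (n : Int) (out : Int) : Decidable (Spec_find_add_kind n out) := by unfold Spec_find_add_kind; infer_instance

-- ===== CLAIM (what is proved, stated in full; the proofs are below) =====
def Claim_equal_find_add_kind : Prop := ∀ (n : Int), Dom_find_add_kind n → Pre_find_add_kind n → Spec_find_add_kind n (find_add_kind n)

-- ===== LEMMAS AND PROOFS =====

-- spec window: pvW m = (f(m-4),f(m-3),f(m-2),f(m-1),f(m)), 0 before the start, f as below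
def pvW : Nat → Int × Int × Int × Int × Int
  | 0 => (0, 0, 0, 0, 1)
  | (n+1) =>
      ((pvW n).2.1, (pvW n).2.2.1, (pvW n).2.2.2.1, (pvW n).2.2.2.2,
        ((pvW n).2.2.2.2 + (pvW n).2.2.2.1 + (pvW n).1) % 10007)

-- f m = number of ordered 1/2/5-compositions of m, mod 10007
def pvF (n : Nat) : Int := (pvW n).2.2.2.2

def pvG (m k : Nat) : Int := if k ≤ m then pvF (m - k) else 0

lemma pvW_eq (m : Nat) : pvW m = (pvG m 4, pvG m 3, pvG m 2, pvG m 1, pvF m) := by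
  induction m with
  | zero => simp [pvW, pvG, pvF]
  | succ k ih =>
      have hsh : ∀ j : Nat, pvG k j = pvG (k+1) (j+1) := by
        intro j; simp only [pvG]
        by_cases h : j ≤ k
        · rw [if_pos h, if_pos (by omega)]; congr 1; omega
        · rw [if_neg h, if_neg (by omega)]
      have hF : pvF k = pvG (k+1) 1 := by
        simp only [pvG, if_pos (show 1 ≤ k + 1 by omega)]
        rfl
      have hlast : (pvF k + pvG k 1 + pvG k 4) % 10007 = pvF (k+1) := by
        show _ = (pvW (k+1)).2.2.2.2
        rw [pvW, ih]
      rw [pvW, ih]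
      simp only
      rw [hlast, hsh 3, hsh 2, hsh 1, hF]

lemma pvF_rec (v : Nat) : pvF (v+1)
    = (pvF v + (if 1 ≤ v then pvF (v-1) else 0) + (if 4 ≤ v then pvF (v-4) else 0)) % 10007 := by
  show (pvW (v+1)).2.2.2.2 = _
  rw [pvW, pvW_eq v]
  simp only [pvG]

lemma pvF_nonneg (m : Nat) : 0 ≤ pvF m := by
  cases m with
  | zero => decide
  | succ k => rw [pvF_rec]; exact Int.emod_nonneg _ (by norm_num)

lemma pvF_lt (m : Nat) : pvF m < 10007 := by
  cases m with
  | zero => decide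
  | succ k => rw [pvF_rec]; exact Int.emod_lt_of_pos _ (by norm_num)

-- ---- B side: Kitamasa correctness over ZMod 10007 ----

-- f modulo 10007, in the field
def pvFz (m : Nat) : ZMod 10007 := ((pvF m : Int) : ZMod 10007)

lemma pv_cast_mod (a : Int) : ((a % 10007 : Int) : ZMod 10007) = (a : ZMod 10007) := by
  exact_mod_cast ZMod.intCast_mod a 10007

lemma pvFz_rec (m : Nat) : pvFz (m+5) = pvFz (m+4) + pvFz (m+3) + pvFz m := by
  unfold pvFz
  rw [show m + 5 = (m+4) + 1 from rfl, pvF_rec (m+4),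
      if_pos (show 1 ≤ m + 4 by omega), if_pos (show 4 ≤ m + 4 by omega),
      show m + 4 - 1 = m + 3 from by omega, show m + 4 - 4 = m from by omega,
      pv_cast_mod]
  push_cast
  ring

-- the linear functional: a 5-tuple of coefficients applied to the window f(m..m+4)
def pvE (c : Int × Int × Int × Int × Int) (m : Nat) : ZMod 10007 :=
  (c.1 : ZMod 10007) * pvFz m + (c.2.1 : ZMod 10007) * pvFz (m+1)
    + (c.2.2.1 : ZMod 10007) * pvFz (m+2) + (c.2.2.2.1 : ZMod 10007) * pvFz (m+3)
    + (c.2.2.2.2 : ZMod 10007) * pvFz (m+4)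

-- c represents x^k in Z[x]/(x^5-x^4-x^3-1, 10007)
def pvRep (c : Int × Int × Int × Int × Int) (k : Nat) : Prop :=
  ∀ m : Nat, pvE c m = pvFz (m + k)

lemma pvRep_one : pvRep (1, 0, 0, 0, 0) 0 := by
  intro m; simp [pvE]

lemma pvRep_x : pvRep (0, 1, 0, 0, 0) 1 := by
  intro m; simp [pvE]

lemma pvE_mulmod (c d : Int × Int × Int × Int × Int) (m : Nat) :
    pvE (pvMulmod c d) m
      = (c.1 : ZMod 10007) * pvE d m + (c.2.1 : ZMod 10007) * pvE d (m+1)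
        + (c.2.2.1 : ZMod 10007) * pvE d (m+2) + (c.2.2.2.1 : ZMod 10007) * pvE d (m+3)
        + (c.2.2.2.2 : ZMod 10007) * pvE d (m+4) := by
  have h5 := pvFz_rec m
  have h6 := pvFz_rec (m+1)
  have h7 := pvFz_rec (m+2)
  have h8 := pvFz_rec (m+3)
  simp only [pvMulmod, pvE, PySem.Int.mod_eq_emod_of_pos (show (0:Int) < 10007 by norm_num)]
  push_cast [pv_cast_mod]
  simp only [show m+1+1 = m+2 from by omega, show m+1+2 = m+3 from by omega,
    show m+1+3 = m+4 from by omega, show m+1+4 = m+5 from by omega,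
        show m+2+4 = m+6 from by omega,
        show m+3+4 = m+7 from by omega,
        show m+4+4 = m+8 from by omega]
  simp only [show m+1+5 = m+6 from by omega, show m+2+5 = m+7 from by omega,
    show m+3+5 = m+8 from by omega] at h6 h7 h8
  rw [h8, h7, h6, h5]
  ring

lemma pvRep_mul {c d : Int × Int × Int × Int × Int} {a b : Nat}
    (hc : pvRep c a) (hd : pvRep d b) : pvRep (pvMulmod c d) (a + b) := by
  intro m
  rw [pvE_mulmod, hd m, hd (m+1), hd (m+2), hd (m+3), hd (m+4)]
  have := hc (m + b)
  simp only [pvE] at this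
  rw [show m + b + a = m + (a + b) from by omega] at this
  rw [show m + 1 + b = m + b + 1 from by omega, show m + 2 + b = m + b + 2 from by omega,
      show m + 3 + b = m + b + 3 from by omega, show m + 4 + b = m + b + 4 from by omega]
  exact this

lemma pvPowLoop_rep (k : Nat) : ∀ (e : Int), e.toNat = k →
    ∀ (r x : Int × Int × Int × Int × Int) (a b : Nat),
      pvRep r a → pvRep x b → pvRep (pvPowLoop e r x) (a + e.toNat * b) := by
  induction k using Nat.strong_induction_on with
  | _ k ih =>
    intro e hk r x a b hr hx
    rw [pvPowLoop]
    by_cases he : 0 < e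
    · rw [dif_pos he]
      have hdiv : PySem.Int.floordiv e 2 = e / 2 :=
        PySem.Int.floordiv_eq_ediv_of_pos (by norm_num)
      have hmod : PySem.Int.mod e 2 = e % 2 :=
        PySem.Int.mod_eq_emod_of_pos (by norm_num)
      have hlt : (PySem.Int.floordiv e 2).toNat < k := by rw [hdiv]; omega
      have hx' : pvRep (pvMulmod x x) (b + b) := pvRep_mul hx hx
      by_cases hbit : PySem.Int.mod e 2 = 1
      · rw [if_pos hbit]
        have h := ih _ hlt (PySem.Int.floordiv e 2) rfl _ _ (a + b) (b + b)
          (pvRep_mul hr hx) hx'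
        have harith : a + b + (PySem.Int.floordiv e 2).toNat * (b + b) = a + e.toNat * b := by
          rw [hdiv]; rw [hmod] at hbit
          have hq : e.toNat = 2 * (e / 2).toNat + 1 := by omega
          rw [hq]; ring
        rwa [harith] at h
      · rw [if_neg hbit]
        have h := ih _ hlt (PySem.Int.floordiv e 2) rfl _ _ a (b + b) hr hx'
        have harith : a + (PySem.Int.floordiv e 2).toNat * (b + b) = a + e.toNat * b := by
          rw [hdiv]; rw [hmod] at hbit
          have hb2 := Int.emod_two_eq e
          have hq : e.toNat = 2 * (e / 2).toNat := by omega
          rw [hq]; ring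
        rwa [harith] at h
    · rw [dif_neg he]
      have : e.toNat = 0 := by omega
      rw [this, Nat.mul_comm, Nat.mul_zero, Nat.add_zero]
      exact hr

lemma pv_b_eq (m : Nat) : find_add_kind_alt (m : Int) = pvF m := by
  have hrep : pvRep (pvPowLoop (m : Int) (1, 0, 0, 0, 0) (0, 1, 0, 0, 0)) m := by
    have h := pvPowLoop_rep ((m : Int)).toNat (m : Int) rfl _ _ 0 1 pvRep_one pvRep_x
    rwa [Int.toNat_natCast, Nat.zero_add, Nat.mul_one] at h
  set t := pvPowLoop (m : Int) (1, 0, 0, 0, 0) (0, 1, 0, 0, 0) with ht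
  have hE := hrep 0
  simp only [pvE, Nat.zero_add] at hE
  rw [show pvFz 0 = 1 from by decide, show pvFz 1 = 1 from by decide,
      show pvFz 2 = 2 from by decide, show pvFz 3 = 3 from by decide,
      show pvFz 4 = 5 from by decide] at hE
  have hcast : ((find_add_kind_alt (m : Int) : Int) : ZMod 10007)
      = ((pvF m : Int) : ZMod 10007) := by
    show (((PySem.Int.mod (t.1 * 1 + t.2.1 * 1 + t.2.2.1 * 2 + t.2.2.2.1 * 3 + t.2.2.2.2 * 5) 10007 : Int)) : ZMod 10007) = _
    rw [PySem.Int.mod_eq_emod_of_pos (by norm_num), pv_cast_mod]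
    push_cast
    rw [show ((pvF m : Int) : ZMod 10007) = pvFz m from rfl]
    exact hE
  have hbL1 : 0 ≤ find_add_kind_alt (m : Int) := PySem.Int.mod_nonneg _ (by norm_num)
  have hbL2 : find_add_kind_alt (m : Int) < 10007 := PySem.Int.mod_lt _ (by norm_num)
  have hbR1 := pvF_nonneg m
  have hbR2 := pvF_lt m
  have h2 := (ZMod.intCast_eq_intCast_iff' _ _ _).mp hcast
  have h3 : find_add_kind_alt (m : Int) % 10007 = pvF m % 10007 := by exact_mod_cast h2
  omega

-- ---- A side ----

-- expected dp entry at index j after the main loop has processed val = 1..v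
def pvEdp (v j : Nat) : Int :=
  if j = 0 then 0
  else if j ≤ v then pvF j
  else if j = 1 ∨ j = 2 ∨ j = 5 then 1 else -1

def pvBody (val num : Int) (d : Array Int) : Array Int :=
  if val < num ∨ pvAGet d (val - num) = -1 then d
  else
    let d := if pvAGet d val = -1
             then pvASet d val 0 else d
    pvASet d val
      (PySem.Int.mod (PySem.Int.mod (pvAGet d val) 10007
         + PySem.Int.mod (pvAGet d (val - num)) 10007) 10007)

def pvInner (val : Int) (d : Array Int) : Array Int :=
  [(1 : Int), 2, 5].foldl (fun d num => pvBody val num d) d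

lemma pv_map_set (m j : Nat) (f : Nat → Int) (x : Int) (_hj : j ≤ m) :
    ((List.range (m+1)).map f).set j x
      = (List.range (m+1)).map (fun i => if i = j then x else f i) := by
  apply List.ext_getElem
  · simp
  · intro i h1 h2
    simp only [List.getElem_set, List.getElem_map, List.getElem_range]
    split_ifs <;> first | rfl | omega

lemma pv_read (m j : Nat) (f : Nat → Int) (_hj : j ≤ m) :
    pvAGet ((List.range (m+1)).map f).toArray ((j : Nat) : Int) = f j := by
  have hsz : ((List.range (m+1)).map f).toArray.size = m + 1 := by simp
  unfold pvAGet
  rw [dif_pos (by constructor <;> [positivity; (rw [hsz]; simp; omega)])]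
  simp

lemma pv_set (m j : Nat) (f : Nat → Int) (x : Int) (hj : j ≤ m) :
    pvASet ((List.range (m+1)).map f).toArray ((j : Nat) : Int) x
      = ((List.range (m+1)).map (fun i => if i = j then x else f i)).toArray := by
  unfold pvASet
  rw [List.setIfInBounds_toArray, Int.toNat_natCast, pv_map_set m j f x hj]

lemma pvEdp_frozen (v i : Nat) (hi : i ≠ v + 1) : pvEdp v i = pvEdp (v+1) i := by
  simp only [pvEdp]; split_ifs <;> first | rfl | omega

lemma pv_body_skip (val num : Int) (d : Array Int)
    (h : val < num ∨ pvAGet d (val - num) = -1) :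
    pvBody val num d = d := by
  unfold pvBody; rw [if_pos h]

lemma pv_body_eq (m v w : Nat) (num : Int) (f : Nat → Int) (x cur : Int)
    (hv : v < m) (hw1 : 1 ≤ w) (hw : w ≤ v + 1)
    (hnum : num = ((w : Nat) : Int))
    (hread : ¬ f (v + 1 - w) = -1)
    (hcur : cur = if f (v + 1) = -1 then 0 else f (v + 1))
    (hx : x = PySem.Int.mod (PySem.Int.mod cur 10007
        + PySem.Int.mod (f (v + 1 - w)) 10007) 10007) :
    pvBody ((v + 1 : Nat) : Int) num ((List.range (m+1)).map f).toArray
      = ((List.range (m+1)).map (fun i => if i = v + 1 then x else f i)).toArray := by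
  subst hnum
  have hsub : ((v + 1 : Nat) : Int) - ((w : Nat) : Int) = ((v + 1 - w : Nat) : Int) := by omega
  have hlt : ¬ (((v + 1 : Nat) : Int) < ((w : Nat) : Int)) := by omega
  unfold pvBody
  rw [hsub, pv_read m (v+1-w) f (by omega), if_neg (not_or.mpr ⟨hlt, hread⟩)]
  simp only [pv_read m (v+1) f (by omega)]
  by_cases hc : f (v+1) = -1
  · rw [if_pos hc]
    rw [pv_set m (v+1) f 0 (by omega)]
    rw [pv_read m (v+1) _ (by omega), pv_read m (v+1-w) _ (by omega)]
    rw [pv_set m (v+1) _ _ (by omega)]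
    refine congrArg List.toArray (List.map_congr_left ?_)
    intro i hi
    by_cases hi' : i = v + 1
    · subst hi'
      simp [hx, hcur, hc, show ¬ (v + 1 - w = v + 1) from by omega]
    · simp only [if_neg hi']
  · rw [if_neg hc, pv_read m (v+1) f (by omega), pv_read m (v+1-w) f (by omega)]
    rw [pv_set m (v+1) f _ (by omega)]
    refine congrArg List.toArray (List.map_congr_left ?_)
    intro i hi
    by_cases hi' : i = v + 1
    · subst hi'
      simp [hx, hcur, hc]
    · simp only [if_neg hi']

lemma pv_step (m v : Nat) (hv : v < m) :
    pvInner (((v+1 : Nat) : Int)) ((List.range (m+1)).map (pvEdp v)).toArray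
      = ((List.range (m+1)).map (pvEdp (v+1))).toArray := by
  simp only [pvInner, List.foldl_cons, List.foldl_nil]
  by_cases h5 : 5 ≤ v
  · -- generic case v ≥ 5: no seeding, all three parts contribute
    have hE1 : pvEdp v (v+1) = -1 := by
      simp only [pvEdp]; rw [if_neg (by omega), if_neg (by omega), if_neg (by omega)]
    have hEvv : pvEdp v v = pvF v := by
      simp only [pvEdp]; rw [if_neg (by omega), if_pos le_rfl]
    have hEv1 : pvEdp v (v-1) = pvF (v-1) := by
      simp only [pvEdp]; rw [if_neg (by omega), if_pos (by omega)]
    have hEv4 : pvEdp v (v-4) = pvF (v-4) := by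
      simp only [pvEdp]; rw [if_neg (by omega), if_pos (by omega)]
    have hx1ne : ¬ (PySem.Int.mod (PySem.Int.mod 0 10007 + PySem.Int.mod (pvF v) 10007) 10007 : Int) = -1 := by
      have := PySem.Int.mod_nonneg (PySem.Int.mod 0 10007 + PySem.Int.mod (pvF v) 10007) (show (0:Int) < 10007 by norm_num)
      omega
    rw [pv_body_eq m v 1 1 (pvEdp v)
         (PySem.Int.mod (PySem.Int.mod 0 10007 + PySem.Int.mod (pvF v) 10007) 10007) 0
         hv (by omega) (by omega) (by norm_num)
         (by rw [show v + 1 - 1 = v from rfl, hEvv]; have := pvF_nonneg v; omega)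
         (by rw [hE1]; norm_num)
         (by rw [show v + 1 - 1 = v from rfl, hEvv])]
    set x1 : Int := PySem.Int.mod (PySem.Int.mod 0 10007 + PySem.Int.mod (pvF v) 10007) 10007 with hx1
    have hx2ne : ¬ (PySem.Int.mod (PySem.Int.mod x1 10007 + PySem.Int.mod (pvF (v-1)) 10007) 10007 : Int) = -1 := by
      have := PySem.Int.mod_nonneg (PySem.Int.mod x1 10007 + PySem.Int.mod (pvF (v-1)) 10007) (show (0:Int) < 10007 by norm_num)
      omega
    rw [pv_body_eq m v 2 2 (fun i => if i = v + 1 then x1 else pvEdp v i)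
         (PySem.Int.mod (PySem.Int.mod x1 10007 + PySem.Int.mod (pvF (v-1)) 10007) 10007) x1
         hv (by omega) (by omega) (by norm_num)
         (by show ¬ (if v + 1 - 2 = v + 1 then x1 else pvEdp v (v + 1 - 2)) = -1
             rw [if_neg (show ¬ (v + 1 - 2 = v + 1) from by omega),
                 show v + 1 - 2 = v - 1 from by omega, hEv1]
             have := pvF_nonneg (v-1); omega)
         (by show x1 = if (if v + 1 = v + 1 then x1 else pvEdp v (v + 1)) = -1 then 0
                  else (if v + 1 = v + 1 then x1 else pvEdp v (v + 1))
             rw [if_pos rfl, if_neg hx1ne])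
         (by show _ = PySem.Int.mod (PySem.Int.mod x1 10007
               + PySem.Int.mod (if v + 1 - 2 = v + 1 then x1 else pvEdp v (v + 1 - 2)) 10007) 10007
             rw [if_neg (show ¬ (v + 1 - 2 = v + 1) from by omega),
                 show v + 1 - 2 = v - 1 from by omega, hEv1])]
    set x2 : Int := PySem.Int.mod (PySem.Int.mod x1 10007 + PySem.Int.mod (pvF (v-1)) 10007) 10007 with hx2
    rw [pv_body_eq m v 5 5 (fun i => if i = v + 1 then x2
           else if i = v + 1 then x1 else pvEdp v i)
         (PySem.Int.mod (PySem.Int.mod x2 10007 + PySem.Int.mod (pvF (v-4)) 10007) 10007) x2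
         hv (by omega) (by omega) (by norm_num)
         (by show ¬ (if v + 1 - 5 = v + 1 then x2
               else if v + 1 - 5 = v + 1 then x1 else pvEdp v (v + 1 - 5)) = -1
             rw [if_neg (show ¬ (v + 1 - 5 = v + 1) from by omega),
                 if_neg (show ¬ (v + 1 - 5 = v + 1) from by omega),
                 show v + 1 - 5 = v - 4 from by omega, hEv4]
             have := pvF_nonneg (v-4); omega)
         (by show x2 = if (if v + 1 = v + 1 then x2
                  else if v + 1 = v + 1 then x1 else pvEdp v (v + 1)) = -1 then 0
                  else (if v + 1 = v + 1 then x2 else if v + 1 = v + 1 then x1 else pvEdp v (v + 1))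
             rw [if_pos rfl, if_neg hx2ne])
         (by show _ = PySem.Int.mod (PySem.Int.mod x2 10007
               + PySem.Int.mod (if v + 1 - 5 = v + 1 then x2
                   else if v + 1 - 5 = v + 1 then x1 else pvEdp v (v + 1 - 5)) 10007) 10007
             rw [if_neg (show ¬ (v + 1 - 5 = v + 1) from by omega),
                 if_neg (show ¬ (v + 1 - 5 = v + 1) from by omega),
                 show v + 1 - 5 = v - 4 from by omega, hEv4])]
    refine congrArg List.toArray (List.map_congr_left ?_)
    intro i hi
    by_cases hi' : i = v + 1
    · subst hi'
      simp only [reduceIte]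
      have htgt : pvEdp (v+1) (v+1) = pvF (v+1) := by
        simp only [pvEdp]; rw [if_neg (by omega), if_pos le_rfl]
      rw [htgt, hx2, hx1, pvF_rec v, if_pos (by omega : 1 ≤ v), if_pos (by omega : 4 ≤ v)]
      simp only [PySem.Int.mod_eq_emod_of_pos (show (0:Int) < 10007 by norm_num)]
      omega
    · simp only [if_neg hi', pvEdp_frozen v i hi']
  · -- small cases v = 0..4: seeding and boundary effects, everything concrete
    interval_cases v
    · -- v = 0, val = 1: only num = 1 fires
      rw [pv_body_eq m 0 1 1 (pvEdp 0) 1 1 (by omega) (by omega) (by omega) (by norm_num)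
           (by decide) (by decide) (by decide)]
      rw [pv_body_skip _ 2 _ (Or.inl (by norm_num)),
          pv_body_skip _ 5 _ (Or.inl (by norm_num))]
      refine congrArg List.toArray (List.map_congr_left ?_)
      intro i hi
      by_cases hi' : i = 1
      · subst hi'; decide
      · simp only [if_neg hi', pvEdp_frozen 0 i hi']
    · -- v = 1, val = 2
      rw [pv_body_eq m 1 1 1 (pvEdp 1) 2 1 (by omega) (by omega) (by omega) (by norm_num)
           (by decide) (by decide) (by decide)]
      rw [pv_body_eq m 1 2 2 (fun i => if i = 1 + 1 then 2 else pvEdp 1 i) 2 2 (by omega) (by omega) (by omega) (by norm_num)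
           (by decide) (by decide) (by decide)]
      rw [pv_body_skip _ 5 _ (Or.inl (by norm_num))]
      refine congrArg List.toArray (List.map_congr_left ?_)
      intro i hi
      by_cases hi' : i = 2
      · subst hi'; decide
      · simp only [if_neg hi', pvEdp_frozen 1 i hi']
    · -- v = 2, val = 3
      rw [pv_body_eq m 2 1 1 (pvEdp 2) 2 0 (by omega) (by omega) (by omega) (by norm_num)
           (by decide) (by decide) (by decide)]
      rw [pv_body_eq m 2 2 2 (fun i => if i = 2 + 1 then 2 else pvEdp 2 i) 3 2 (by omega) (by omega) (by omega) (by norm_num)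
           (by decide) (by decide) (by decide)]
      rw [pv_body_skip _ 5 _ (Or.inl (by norm_num))]
      refine congrArg List.toArray (List.map_congr_left ?_)
      intro i hi
      by_cases hi' : i = 3
      · subst hi'; decide
      · simp only [if_neg hi', pvEdp_frozen 2 i hi']
    · -- v = 3, val = 4
      rw [pv_body_eq m 3 1 1 (pvEdp 3) 3 0 (by omega) (by omega) (by omega) (by norm_num)
           (by decide) (by decide) (by decide)]
      rw [pv_body_eq m 3 2 2 (fun i => if i = 3 + 1 then 3 else pvEdp 3 i) 5 3 (by omega) (by omega) (by omega) (by norm_num)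
           (by decide) (by decide) (by decide)]
      rw [pv_body_skip _ 5 _ (Or.inl (by norm_num))]
      refine congrArg List.toArray (List.map_congr_left ?_)
      intro i hi
      by_cases hi' : i = 4
      · subst hi'; decide
      · simp only [if_neg hi', pvEdp_frozen 3 i hi']
    · -- v = 4, val = 5: seeded cell, all three parts
      rw [pv_body_eq m 4 1 1 (pvEdp 4) 6 1 (by omega) (by omega) (by omega) (by norm_num)
           (by decide) (by decide) (by decide)]
      rw [pv_body_eq m 4 2 2 (fun i => if i = 4 + 1 then 6 else pvEdp 4 i) 9 6 (by omega) (by omega) (by omega) (by norm_num)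
           (by decide) (by decide) (by decide)]
      rw [pv_body_eq m 4 5 5 (fun i => if i = 4 + 1 then 9 else (fun i => if i = 4 + 1 then 6 else pvEdp 4 i) i) 9 9 (by omega) (by omega) (by omega) (by norm_num)
           (by decide) (by decide) (by decide)]
      refine congrArg List.toArray (List.map_congr_left ?_)
      intro i hi
      by_cases hi' : i = 5
      · subst hi'; decide
      · simp only [if_neg hi', pvEdp_frozen 4 i hi']


lemma pv_init (m : Nat) :
    [(1 : Int), 2, 5].foldl (fun d num => pvASet d num 1)
      (pvASet (Array.replicate (((m : Int) + 1)).toNat (-1)) 0 0)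
      = ((List.range (m+1)).map (pvEdp 0)).toArray := by
  have h1 : (((m : Int)) + 1).toNat = m + 1 := by omega
  rw [h1, Array.replicate_eq_toArray_replicate]
  simp only [List.foldl_cons, List.foldl_nil, pvASet, List.setIfInBounds_toArray,
    show ((0:Int)).toNat = 0 from rfl, show ((1:Int)).toNat = 1 from rfl,
    show ((2:Int)).toNat = 2 from rfl, show ((5:Int)).toNat = 5 from rfl]
  refine congrArg List.toArray ?_
  apply List.ext_getElem
  · simp
  · intro i h1 h2
    simp only [List.getElem_set, List.getElem_map, List.getElem_range, List.getElem_replicate, pvEdp]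
    split_ifs <;> omega

lemma pv_fold (m v : Nat) (hv : v ≤ m) :
    (PySem.List.pyRange 1 ((v : Int) + 1) 1).foldl (fun d val => pvInner val d)
      ((List.range (m+1)).map (pvEdp 0)).toArray
      = ((List.range (m+1)).map (pvEdp v)).toArray := by
  induction v with
  | zero =>
      rw [show ((0:Nat):Int) + 1 = 1 by norm_num, PySem.List.pyRange_one_eq_nil (by omega)]
      rfl
  | succ k ih =>
      rw [show ((k+1 : Nat) : Int) + 1 = ((k : Int) + 1) + 1 by push_cast; ring,
          PySem.List.pyRange_one_succ_right (by omega), List.foldl_append,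
          ih (by omega)]
      simp only [List.foldl_cons, List.foldl_nil]
      rw [show ((k : Int) + 1) = ((k+1 : Nat) : Int) by push_cast; ring]
      exact pv_step m k (by omega)

lemma pv_a_eq (m : Nat) (hm : 5 ≤ m) : find_add_kind (m : Int) = pvF m := by
  have hport : find_add_kind (m : Int)
      = pvAGet
          ((PySem.List.pyRange 1 ((m : Int) + 1) 1).foldl (fun d val => pvInner val d)
            ([(1 : Int), 2, 5].foldl (fun d num => pvASet d num 1)
              (pvASet (Array.replicate (((m : Int) + 1)).toNat (-1)) 0 0)))
          ((m : Int)) := rfl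
  rw [hport, pv_init m, pv_fold m m le_rfl, pv_read m m (pvEdp m) le_rfl]
  simp only [pvEdp]
  rw [if_neg (by omega), if_pos le_rfl]

-- ===== VERDICT (by name: the statement is the Claim_ definition above) =====
theorem find_add_kind_spec : Claim_equal_find_add_kind := by
  intro n _ hpre
  unfold Spec_find_add_kind
  unfold Pre_find_add_kind at hpre
  obtain ⟨m, rfl⟩ : ∃ m : Nat, n = (m : Int) := ⟨n.toNat, (Int.toNat_of_nonneg (by omega)).symm⟩
  rw [pv_a_eq m (by exact_mod_cast hpre), pv_b_eq m]
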